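-- pv_equiv track=rewrite | github.com/cbabnik/miserable | precompiler/precompiler.py | remove_one
-- ===== SOURCE A (Python) =====
-- def remove_one(stack):
--     # if function is empty, do nothing, this happens when a function definition ends
--     # or when the file reaches the end
--     if len(stack) == 0:
--         return (stack, [])
--     if stack == [1]:
--         return ([], [";"])
--     val = stack.pop()
--     # remove one from top level, if that would make the count 0, add ';' and recurse
--     if (val == 1):
--         stack, semis = remove_one(stack)
--         semis.append(";")
--         return stack, semis
--     else:
--         stack.append(val-1)
--         return (stack, [])
-- ===== SOURCE B (Python) =====
-- def remove_one(stack):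
--     if len(stack) == 0:
--         return (stack, [])
--     semis = []
--     while len(stack) > 1 and stack[-1] == 1:
--         stack.pop()
--         semis.append(";")
--     if stack == [1]:
--         return ([], semis + [";"])
--     stack.append(stack.pop() - 1)
--     return (stack, semis)
-- ===== Notes on version B (the rewrite author's own statement) =====
-- stated objective: alternative
-- what changed: Replaces A's recursion (pop one trailing 1 per recursive call, appending ';' after the call returns) with a single explicit while-loop that pops all trailing 1s into an accumulator, then handles the all-ones and decrement cases once.
import Mathlib
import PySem

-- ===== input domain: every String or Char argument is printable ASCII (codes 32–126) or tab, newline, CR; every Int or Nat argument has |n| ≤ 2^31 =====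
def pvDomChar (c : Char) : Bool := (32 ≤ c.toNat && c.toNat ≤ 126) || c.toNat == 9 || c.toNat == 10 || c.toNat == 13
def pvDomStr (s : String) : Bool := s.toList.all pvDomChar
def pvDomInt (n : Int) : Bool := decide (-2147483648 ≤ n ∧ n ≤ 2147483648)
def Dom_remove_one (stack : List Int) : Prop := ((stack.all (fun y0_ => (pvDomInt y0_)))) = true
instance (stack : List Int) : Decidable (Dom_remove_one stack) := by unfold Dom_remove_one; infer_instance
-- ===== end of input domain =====

-- B replaces A's recursion with one explicit loop popping all trailing 1s; equivalence is about
-- the RETURN value (both mutate the argument the same way in Python, not modelled here).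

-- ===== PORT A =====
def remove_one (stack : List Int) : List Int × List String :=
  if _h0 : stack.length = 0 then (stack, [])
  else if stack = [1] then ([], [";"])
  else
    -- val = stack.pop(): last element; the rest is dropLast (stack nonempty here)
    let val := stack.getLastD 0
    if val = 1 then
      let p := remove_one stack.dropLast
      (p.1, p.2 ++ [";"])
    else
      (stack.dropLast ++ [val - 1], [])
termination_by stack.length
decreasing_by simp [List.length_dropLast]; omega

-- ===== PORT B =====
-- the while-loop of Source B, with its accumulator
def popOnes (stack : List Int) (semis : List String) : List Int × List String :=
  if _h : 1 < stack.length ∧ stack.getLastD 0 = 1 then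
    popOnes stack.dropLast (semis ++ [";"])
  else (stack, semis)
termination_by stack.length
decreasing_by simp [List.length_dropLast]; omega

def remove_one_alt (stack : List Int) : List Int × List String :=
  if stack = [] then (stack, [])
  else
    let p := popOnes stack []
    if p.1 = [1] then ([], p.2 ++ [";"])
    else (p.1.dropLast ++ [p.1.getLastD 0 - 1], p.2)

-- ===== PRECONDITION & SPEC =====
def Spec_remove_one (stack : List Int) (out : List Int × List String) : Prop := out = remove_one_alt stack
instance (stack : List Int) (out : List Int × List String) : Decidable (Spec_remove_one stack out) := by unfold Spec_remove_one; infer_instance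

-- ===== CLAIM (what is proved, stated in full; the proofs are below) =====
def Claim_equal_remove_one : Prop := ∀ (stack : List Int), Dom_remove_one stack → Spec_remove_one stack (remove_one stack)

-- ===== LEMMAS AND PROOFS =====

-- the loop's accumulator can be factored out
lemma popOnes_acc (n : Nat) : ∀ s : List Int, s.length ≤ n → ∀ acc : List String,
    popOnes s acc = ((popOnes s []).1, acc ++ (popOnes s []).2) := by
  induction n with
  | zero =>
    intro s hs acc
    have : s = [] := List.eq_nil_of_length_eq_zero (Nat.le_zero.mp hs)
    subst this
    simp [popOnes]
  | succ n ih =>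
    intro s hs acc
    by_cases h : 1 < s.length ∧ s.getLastD 0 = 1
    · have hl : s.dropLast.length ≤ n := by simp [List.length_dropLast]; omega
      have e1 : popOnes s acc = popOnes s.dropLast (acc ++ [";"]) := by
        rw [popOnes, dif_pos h]
      have e2 : popOnes s [] = popOnes s.dropLast [";"] := by
        rw [popOnes, dif_pos h]; rfl
      rw [e1, e2, ih _ hl (acc ++ [";"]), ih _ hl [";"]]
      simp
    · have e : ∀ a : List String, popOnes s a = (s, a) := fun a => by
        rw [popOnes, dif_neg h]
      rw [e, e]
      simp

-- every string the loop accumulates is ";"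
lemma popOnes_snd_rep (n : Nat) : ∀ s : List Int, s.length ≤ n →
    (popOnes s []).2 = List.replicate (popOnes s []).2.length ";" := by
  induction n with
  | zero =>
    intro s hs
    have : s = [] := List.eq_nil_of_length_eq_zero (Nat.le_zero.mp hs)
    subst this
    simp [popOnes]
  | succ n ih =>
    intro s hs
    by_cases h : 1 < s.length ∧ s.getLastD 0 = 1
    · have hl : s.dropLast.length ≤ n := by simp [List.length_dropLast]; omega
      have e2 : popOnes s [] = popOnes s.dropLast [";"] := by
        rw [popOnes, dif_pos h]; rfl
      rw [e2, popOnes_acc n _ hl]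
      simp
      rw [List.replicate_succ]
      exact congrArg _ (ih _ hl)
    · have e : popOnes s [] = (s, []) := by rw [popOnes, dif_neg h]
      rw [e]
      simp

lemma main_eq (n : Nat) : ∀ s : List Int, s.length ≤ n → remove_one s = remove_one_alt s := by
  induction n with
  | zero =>
    intro s hs
    have : s = [] := List.eq_nil_of_length_eq_zero (Nat.le_zero.mp hs)
    subst this
    simp [remove_one, remove_one_alt]
  | succ n ih =>
    intro s hs
    by_cases hnil : s = []
    · subst hnil; simp [remove_one, remove_one_alt]
    · have hlen : s.length ≠ 0 := by simpa using hnil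
      by_cases hone : s = [1]
      · subst hone
        rw [remove_one, remove_one_alt, popOnes]
        simp
      · rw [remove_one, dif_neg hlen, if_neg hone]
        by_cases hval : s.getLastD 0 = 1
        · -- trailing 1 popped; s.length > 1 here
          have hlen1 : 1 < s.length := by
            rcases s with _ | ⟨a, t⟩
            · exact absurd rfl hnil
            · rcases t with _ | ⟨b, u⟩
              · exfalso; apply hone
                simp [List.getLastD] at hval
                simp [hval]
              · simp
          have hrestne : s.dropLast ≠ [] := by
            intro hc
            have hld : s.dropLast.length = 0 := by rw [hc]; rfl
            simp [List.length_dropLast] at hld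
            omega
          have hl : s.dropLast.length ≤ n := by simp [List.length_dropLast]; omega
          have e2 : popOnes s [] = popOnes s.dropLast [";"] := by
            rw [popOnes, dif_pos ⟨hlen1, hval⟩]; rfl
          rw [if_pos hval, ih _ hl]
          conv_lhs => rw [remove_one_alt, if_neg hrestne]
          conv_rhs => rw [remove_one_alt, if_neg hnil, e2, popOnes_acc n _ hl]
          have hrep := popOnes_snd_rep n _ hl
          set p := popOnes s.dropLast [] with hp
          have hcomm : [";"] ++ p.2 = p.2 ++ [";"] := by
            rw [hrep, ← List.replicate_succ']
            simp [List.replicate_succ]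
          by_cases hp1 : p.1 = [1]
          · simp only [hp1]
            simp [← hcomm]
          · simp [hp1, hcomm]
        · -- last element not 1: the loop does nothing
          rw [if_neg hval, remove_one_alt, if_neg hnil]
          have e : popOnes s [] = (s, []) := by
            rw [popOnes, dif_neg (fun h => hval h.2)]
          rw [e]
          simp [hone]

-- ===== VERDICT (by name: the statement is the Claim_ definition above) =====
theorem remove_one_spec : Claim_equal_remove_one := by
  intro s _
  unfold Spec_remove_one
  exact main_eq s.length s le_rfl
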